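-- pv_equiv track=rewrite | github.com/maximiliummusterman/GuandanBot | bot_transformer.py | _make_lr_placeholder_cards
-- ===== SOURCE A (Python) =====
-- def make_card(suit: str, rank: str) -> dict:
--     return {"suit": suit, "rank": rank}
--
-- LR_PLACEHOLDER_SUITS = ["spades", "clubs", "diamonds"]
--
-- def _make_lr_placeholder_cards(count: int) -> list:
--     cards = []
--     full_cycles, remainder = divmod(count, len(LR_PLACEHOLDER_SUITS))
--     for _ in range(full_cycles):
--         for suit in LR_PLACEHOLDER_SUITS:
--             cards.append(make_card(suit, "2"))
--     for suit in LR_PLACEHOLDER_SUITS[:remainder]: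
--         cards.append(make_card(suit, "2"))
--     return cards
-- ===== SOURCE B (Python) =====
-- def make_card(suit: str, rank: str) -> dict:
--     return {"suit": suit, "rank": rank}
--
-- LR_PLACEHOLDER_SUITS = ["spades", "clubs", "diamonds"]
--
-- def _make_lr_placeholder_cards(count: int) -> list:
--     return [make_card(LR_PLACEHOLDER_SUITS[i % len(LR_PLACEHOLDER_SUITS)], "2")
--             for i in range(count)]
-- ===== Notes on version B (the rewrite author's own statement) =====
-- stated objective: idiomatic
-- what changed: Replaces the divmod two-phase construction (full cycles via a nested loop, then a slice for the remainder) with a single flat comprehension over range(count) selecting the suit by modular indexing.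
-- intended difference: For negative counts whose floor divmod leaves a nonzero remainder, A returns the leftover remainder cards (an artefact of the negative quotient emptying the cycle loop while the positive remainder still slices suits) whereas B returns the empty list, the intended result for a non-positive card count. — e.g. on _make_lr_placeholder_cards(-1): A returns [[("suit", "spades"), ("rank", "2")], [("suit", "clubs"), ("rank", "2")]], B returns []
import Mathlib
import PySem

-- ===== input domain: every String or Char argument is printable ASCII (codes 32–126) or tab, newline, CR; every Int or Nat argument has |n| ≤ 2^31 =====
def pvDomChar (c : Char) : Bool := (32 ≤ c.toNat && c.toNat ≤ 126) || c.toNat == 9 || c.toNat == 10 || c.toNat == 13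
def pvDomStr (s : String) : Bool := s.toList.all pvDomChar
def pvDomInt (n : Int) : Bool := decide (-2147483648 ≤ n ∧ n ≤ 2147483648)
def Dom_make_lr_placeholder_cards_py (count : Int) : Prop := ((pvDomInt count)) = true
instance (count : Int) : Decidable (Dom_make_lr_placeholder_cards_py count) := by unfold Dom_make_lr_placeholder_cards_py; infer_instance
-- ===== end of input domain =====

-- B replaces A's divmod two-phase construction with a single flat comprehension over
-- range(count), selecting the suit by modular indexing (idiomatic; same cost). On negative
-- counts with a nonzero remainder B returns [] where A returns leftover cards (see D_ below).

-- ===== PORT A =====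
def make_card_py (suit : String) (rank : String) : List (String × String) :=
  [("suit", suit), ("rank", rank)]

def pvSuits : List String := ["spades", "clubs", "diamonds"]

def make_lr_placeholder_cards_py (count : Int) : List (List (String × String)) :=
  let full_cycles := PySem.Int.floordiv count (pvSuits.length : Int)
  let remainder := PySem.Int.mod count (pvSuits.length : Int)
  let cards := (PySem.List.pyRange 0 full_cycles 1).foldl
    (fun cards _ => pvSuits.foldl (fun cards suit => cards ++ [make_card_py suit "2"]) cards) []
  (PySem.List.slice pvSuits none (some remainder)).foldl
    (fun cards suit => cards ++ [make_card_py suit "2"]) cards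

-- ===== PORT B =====
def make_lr_placeholder_cards_py_alt (count : Int) : List (List (String × String)) :=
  (PySem.List.pyRange 0 count 1).map
    (fun i => make_card_py (PySem.List.pyGetD pvSuits (PySem.Int.mod i (pvSuits.length : Int)) "") "2")

-- ===== PRECONDITION & SPEC =====
-- For negative counts whose floor divmod leaves a nonzero remainder, A returns the leftover
-- remainder cards (the negative quotient empties the cycle loop while the positive remainder
-- still slices suits) whereas B returns the empty list, the intended result for a
-- non-positive card count.
def D_make_lr_placeholder_cards_py (count : Int) : Prop :=
  count < 0 ∧ PySem.Int.mod count 3 ≠ 0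
instance (count : Int) : Decidable (D_make_lr_placeholder_cards_py count) := by
  unfold D_make_lr_placeholder_cards_py; infer_instance

def Spec_make_lr_placeholder_cards_py (count : Int) (out : List (List (String × String))) : Prop :=
  ¬ D_make_lr_placeholder_cards_py count → out = make_lr_placeholder_cards_py_alt count
instance (count : Int) (out : List (List (String × String))) : Decidable (Spec_make_lr_placeholder_cards_py count out) := by
  unfold Spec_make_lr_placeholder_cards_py; infer_instance

def pvDiffWitness_make_lr_placeholder_cards_py : Int := -1
def pvDiffWitnessOut_make_lr_placeholder_cards_py :
    (List (List (String × String))) × (List (List (String × String))) :=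
  ([[("suit", "spades"), ("rank", "2")], [("suit", "clubs"), ("rank", "2")]], [])

-- ===== CLAIM =====
def Claim_unchanged_make_lr_placeholder_cards_py : Prop := ∀ (count : Int), Dom_make_lr_placeholder_cards_py count → Spec_make_lr_placeholder_cards_py count (make_lr_placeholder_cards_py count)
def Claim_changed_make_lr_placeholder_cards_py : Prop := Dom_make_lr_placeholder_cards_py (pvDiffWitness_make_lr_placeholder_cards_py) ∧ D_make_lr_placeholder_cards_py (pvDiffWitness_make_lr_placeholder_cards_py) ∧ make_lr_placeholder_cards_py (pvDiffWitness_make_lr_placeholder_cards_py) = pvDiffWitnessOut_make_lr_placeholder_cards_py.1 ∧ make_lr_placeholder_cards_py_alt (pvDiffWitness_make_lr_placeholder_cards_py) = pvDiffWitnessOut_make_lr_placeholder_cards_py.2 ∧ pvDiffWitnessOut_make_lr_placeholder_cards_py.1 ≠ pvDiffWitnessOut_make_lr_placeholder_cards_py.2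
def Claim_exact_make_lr_placeholder_cards_py : Prop := ∀ (count : Int), Dom_make_lr_placeholder_cards_py count → D_make_lr_placeholder_cards_py count → make_lr_placeholder_cards_py count ≠ make_lr_placeholder_cards_py_alt count

-- ===== LEMMAS AND PROOFS =====

def pvCard (s : String) : List (String × String) := make_card_py s "2"

def pvCycle : List (List (String × String)) := pvSuits.map pvCard

-- the i-th card B builds, as a function of a Nat index
def pvG (k : Nat) : List (String × String) := pvCard (pvSuits.getD (k % 3) "")

lemma pv_len3 : pvSuits.length = 3 := rfl

lemma pv_foldl_cycle (L : List Int) (acc : List (List (String × String))) :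
    L.foldl (fun cards _ => pvSuits.foldl (fun cards suit => cards ++ [make_card_py suit "2"]) cards) acc
      = acc ++ (List.replicate L.length pvCycle).flatten := by
  induction L generalizing acc with
  | nil => simp
  | cons x xs ih =>
      simp only [List.foldl_cons, List.length_cons, List.replicate_succ, List.flatten_cons]
      rw [ih, PySem.List.foldl_append_singleton_eq_map]
      simp [pvCycle, pvCard, List.append_assoc]

lemma pv_range_cycle (q : Nat) :
    (List.range (3 * q)).map pvG = (List.replicate q pvCycle).flatten := by
  induction q with
  | zero => simp
  | succ q ih =>
      have h3 : 3 * (q + 1) = 3 * q + 1 + 1 + 1 := by omega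
      rw [h3, List.range_succ, List.range_succ, List.range_succ]
      simp only [List.map_append, ih, List.map_cons, List.map_nil]
      have g0 : pvG (3 * q) = pvCard "spades" := by
        have h : (3 * q) % 3 = 0 := by omega
        simp [pvG, pvSuits, h]
      have g1 : pvG (3 * q + 1) = pvCard "clubs" := by
        have h : (3 * q + 1) % 3 = 1 := by omega
        simp [pvG, pvSuits, h]
      have g2 : pvG (3 * q + 1 + 1) = pvCard "diamonds" := by
        have h : (3 * q + 1 + 1) % 3 = 2 := by omega
        simp [pvG, pvSuits, h]
      rw [g0, g1, g2, List.replicate_succ', List.flatten_append]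
      simp [pvCycle, pvSuits]

lemma pv_range_split (q r : Nat) (hr : r < 3) :
    (List.range (3 * q + r)).map pvG
      = (List.replicate q pvCycle).flatten ++ (pvSuits.take r).map pvCard := by
  rw [List.range_add, List.map_append, pv_range_cycle]
  congr 1
  have hmod : ∀ j, (3 * q + j) % 3 = j % 3 := fun j => by omega
  interval_cases r <;> simp [List.range_succ, pvG, pvSuits, hmod]

lemma pv_alt_nat (n : Nat) :
    make_lr_placeholder_cards_py_alt (n : Int) = (List.range n).map pvG := by
  unfold make_lr_placeholder_cards_py_alt
  rw [pv_len3, PySem.List.pyRange_one]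
  simp only [sub_zero, Int.toNat_natCast, List.map_map]
  apply List.map_congr_left
  intro k hk
  simp only [Function.comp, zero_add]
  rw [PySem.Int.mod_natCast k 3, PySem.List.pyGetD_natCast]
  rfl

lemma pv_a_nat (n : Nat) :
    make_lr_placeholder_cards_py (n : Int)
      = (List.replicate (n / 3) pvCycle).flatten ++ (pvSuits.take (n % 3)).map pvCard := by
  simp only [make_lr_placeholder_cards_py, pv_len3]
  rw [PySem.Int.floordiv_natCast n 3, PySem.Int.mod_natCast n 3]
  rw [pv_foldl_cycle, PySem.List.slice_to_natCast, PySem.List.foldl_append_singleton_eq_map]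
  have h1 : ((n : Int) / 3).toNat = n / 3 := by omega
  simp [PySem.List.length_pyRange_one, h1]
  rfl

lemma pv_b_eq_a_nat (n : Nat) :
    make_lr_placeholder_cards_py (n : Int) = make_lr_placeholder_cards_py_alt (n : Int) := by
  rw [pv_a_nat, pv_alt_nat]
  have hn : n = 3 * (n / 3) + n % 3 := by omega
  rw [show (List.range n).map pvG = (List.range (3 * (n / 3) + n % 3)).map pvG from by rw [← hn]]
  rw [pv_range_split (n / 3) (n % 3) (by omega)]

lemma pv_neg_empty_A (count : Int) (hneg : count < 0)
    (hmod : PySem.Int.mod count 3 = 0) :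
    make_lr_placeholder_cards_py count = [] := by
  simp only [make_lr_placeholder_cards_py, pv_len3]
  rw [show ((3 : Nat) : Int) = (3 : Int) from by norm_num]
  have hfmul := PySem.Int.floordiv_mul_add_mod count 3
  have hfd : PySem.Int.floordiv count 3 ≤ 0 := by nlinarith [hfmul]
  rw [hmod, PySem.List.pyRange_one_eq_nil hfd, PySem.List.slice_to _ (le_refl (0:Int))]
  simp

lemma pv_nonempty_A (count : Int)
    (hmod : PySem.Int.mod count 3 ≠ 0) :
    make_lr_placeholder_cards_py count ≠ [] := by
  simp only [make_lr_placeholder_cards_py, pv_len3]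
  rw [show ((3 : Nat) : Int) = (3 : Int) from by norm_num]
  have h1 : 0 ≤ PySem.Int.mod count 3 := PySem.Int.mod_nonneg count (by norm_num)
  have h2 : PySem.Int.mod count 3 < 3 := PySem.Int.mod_lt count (by norm_num)
  rw [PySem.List.slice_to _ h1, PySem.List.foldl_append_singleton_eq_map]
  have ht : (PySem.Int.mod count 3).toNat = 1 ∨ (PySem.Int.mod count 3).toNat = 2 := by omega
  rcases ht with h | h <;> rw [h] <;> simp [pvSuits]

lemma pv_alt_neg (count : Int) (hneg : count < 0) :
    make_lr_placeholder_cards_py_alt count = [] := by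
  unfold make_lr_placeholder_cards_py_alt
  rw [PySem.List.pyRange_one_eq_nil (by omega)]
  rfl

-- ===== VERDICT =====
theorem make_lr_placeholder_cards_py_spec : Claim_unchanged_make_lr_placeholder_cards_py := by
  intro count _ hnd
  by_cases hc : 0 ≤ count
  · have : count = ((count.toNat : Nat) : Int) := (Int.toNat_of_nonneg hc).symm
    rw [this, pv_b_eq_a_nat]
  · have hneg : count < 0 := by omega
    have hmod : PySem.Int.mod count 3 = 0 := by
      by_contra h
      exact hnd ⟨hneg, h⟩
    rw [pv_neg_empty_A count hneg hmod, pv_alt_neg count hneg]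

theorem make_lr_placeholder_cards_py_changed : Claim_changed_make_lr_placeholder_cards_py := by
  unfold Claim_changed_make_lr_placeholder_cards_py; decide

theorem make_lr_placeholder_cards_py_tight : Claim_exact_make_lr_placeholder_cards_py := by
  intro count _ hd
  rw [pv_alt_neg count hd.1]
  exact pv_nonempty_A count hd.2
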